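-- pv_equiv track=rewrite | github.com/Fercomp/Algorithms | Learning/BinarySearch/TransitionPoints(CCI).py | first_non_negative
-- ===== SOURCE A (Python) =====
-- def first_non_negative(nums):
--     l = 0
--     r = len(nums) -1
--     while r > l + 1:
--         mid = (l + r) // 2
--         if nums[mid] < 0:
--             l = mid
--         else:
--             r = mid
--     return l
-- ===== SOURCE B (Python) =====
-- def first_non_negative(nums):
--     def go(left, width):
--         # window is [left, left + width]; recurse on the width
--         if width <= 1:
--             return left
--         half = width // 2
--         if nums[left + half] < 0:
--             return go(left + half, width - half)
--         return go(left, half)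
--     return go(0, len(nums) - 1)
-- ===== Notes on version B (the rewrite author's own statement) =====
-- stated objective: alternative
-- what changed: The imperative while loop over mutable endpoints (l, r) is replaced by a structural recursion on the window represented as (left, width): the base case is width <= 1 and the midpoint is left + width//2 instead of (l+r)//2, which performs the same comparisons and returns the same left endpoint.
import Mathlib
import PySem

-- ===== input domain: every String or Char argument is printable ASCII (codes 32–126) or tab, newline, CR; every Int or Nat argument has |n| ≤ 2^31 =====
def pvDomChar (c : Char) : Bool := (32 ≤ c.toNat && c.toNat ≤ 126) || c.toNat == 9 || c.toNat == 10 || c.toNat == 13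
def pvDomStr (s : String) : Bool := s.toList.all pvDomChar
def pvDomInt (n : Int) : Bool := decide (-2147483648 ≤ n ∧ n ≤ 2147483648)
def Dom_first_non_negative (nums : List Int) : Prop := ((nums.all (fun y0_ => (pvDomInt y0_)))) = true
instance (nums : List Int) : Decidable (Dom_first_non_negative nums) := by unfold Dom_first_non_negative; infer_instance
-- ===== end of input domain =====

-- B replaces A's while loop over mutable endpoints (l, r) with a structural recursion on the
-- window's (left, width) pair using midpoint left + width//2; same comparisons, same result
-- (objective: alternative).


-- ===== PORT A =====
-- while r > l + 1: … — fuel is only a totality guard: each iteration shrinks r - l by at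
-- least 1, so nums.length fuel is never exhausted from the entry call.  The index mid is
-- always in range when the loop body runs, so the .getD 0 default is never used (Python's
-- nums[mid] never raises here).
def pvLoopA (nums : List Int) : Nat → Int → Int → Int
  | 0, l, _ => l
  | fuel + 1, l, r =>
    if r > l + 1 then
      let mid := PySem.Int.floordiv (l + r) 2
      if (PySem.List.pyGet? nums mid).getD 0 < 0 then
        pvLoopA nums fuel mid r
      else
        pvLoopA nums fuel l mid
    else l

def first_non_negative (nums : List Int) : Int :=
  pvLoopA nums nums.length 0 ((nums.length : Int) - 1)

-- ===== PORT B =====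
-- go(left, width): structural recursion on the window width, which strictly decreases;
-- the index left + width//2 is always in range on the entry call, so .getD 0 is never used.
def pvGoB (nums : List Int) (left width : Int) : Int :=
  if width ≤ 1 then left
  else
    let half := PySem.Int.floordiv width 2
    if (PySem.List.pyGet? nums (left + half)).getD 0 < 0 then
      pvGoB nums (left + half) (width - half)
    else
      pvGoB nums left half
termination_by width.toNat
decreasing_by
  all_goals
    have h2 := PySem.Int.floordiv_eq_ediv_of_pos (a := width) (by omega : (0:Int) < 2)
    omega

def first_non_negative_alt (nums : List Int) : Int :=
  pvGoB nums 0 ((nums.length : Int) - 1)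

-- ===== PRECONDITION & SPEC =====
def Spec_first_non_negative (nums : List Int) (out : Int) : Prop := out = first_non_negative_alt nums
instance (nums : List Int) (out : Int) : Decidable (Spec_first_non_negative nums out) := by unfold Spec_first_non_negative; infer_instance

-- ===== CLAIM (what is proved, stated in full; the proofs are below) =====
def Claim_equal_first_non_negative : Prop := ∀ (nums : List Int), Dom_first_non_negative nums → Spec_first_non_negative nums (first_non_negative nums)

-- ===== LEMMAS AND PROOFS =====

-- the two midpoint formulas agree: (l + r) // 2 = l + (r - l) // 2
theorem pv_mid_eq (l r : Int) : PySem.Int.floordiv (l + r) 2 = l + PySem.Int.floordiv (r - l) 2 := by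
  have h1 := PySem.Int.floordiv_eq_ediv_of_pos (a := l + r) (by omega : (0:Int) < 2)
  have h2 := PySem.Int.floordiv_eq_ediv_of_pos (a := r - l) (by omega : (0:Int) < 2)
  omega

-- A's fuel loop on (l, r) computes B's width recursion on (l, r - l), given enough fuel:
-- the gap r - l shrinks by at least 1 per iteration.
theorem pvLoopA_eq_pvGoB (nums : List Int) (fuel : Nat) (l r : Int)
    (hf : (r - l).toNat ≤ fuel) : pvLoopA nums fuel l r = pvGoB nums l (r - l) := by
  induction fuel generalizing l r with
  | zero =>
    rw [pvGoB, if_pos (by omega)]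
    rfl
  | succ fuel ih =>
    rw [pvGoB]
    by_cases hc : r ≤ l + 1
    · rw [if_pos (by omega)]
      show (if r > l + 1 then _ else l) = l
      rw [if_neg (by omega)]
    · rw [if_neg (by omega)]
      show (if r > l + 1 then _ else l) = _
      rw [if_pos (by omega)]
      dsimp only
      have hh := PySem.Int.floordiv_eq_ediv_of_pos (a := r - l) (by omega : (0:Int) < 2)
      rw [pv_mid_eq]
      split
      · rw [ih (l + PySem.Int.floordiv (r - l) 2) r (by omega)]
        congr 1
        omega
      · rw [ih l (l + PySem.Int.floordiv (r - l) 2) (by omega)]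
        congr 1
        omega

-- ===== VERDICT (by name: the statement is the Claim_ definition above) =====
theorem first_non_negative_spec : Claim_equal_first_non_negative := by
  intro nums _
  unfold Spec_first_non_negative first_non_negative first_non_negative_alt
  rw [pvLoopA_eq_pvGoB nums nums.length 0 ((nums.length : Int) - 1) (by omega)]
  norm_num
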